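-- pv_equiv track=rewrite | github.com/edwinlbm/AVD_2021_02 | avd_trabalho_prático_preprocessamento_edwin_monteiro.py | forma_bin
-- ===== SOURCE A (Python) =====
-- def forma_bin(dados, inicio, boundary):
--     if inicio < len(boundary):
--         if boundary[inicio] != dados[len(dados)-1]: #intervalo [a, b)
--             saida = list(filter(lambda x: (x >= boundary[inicio-1] and x < boundary[inicio]), dados))
--             return [saida] + forma_bin(dados, inicio+1, boundary)
--         elif boundary[inicio] == dados[len(dados)-1]: # Se for o último elemento, o intervalo é fechado [a, b]
--             saida = list(filter(lambda x: (x >= boundary[inicio-1] and x <= boundary[inicio]), dados))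
--             return [saida]
--     else:
--         return []
-- ===== SOURCE B (Python) =====
-- def forma_bin(dados, inicio, boundary):
--     # One pass over the data distributing each element into precomputed bin specs,
--     # instead of re-filtering the whole data list once per bin.
--     k = len(boundary)
--     if inicio >= k:
--         return []
--     last = dados[len(dados) - 1]
--     # bin specs: half-open [lo, hi) until the first boundary equal to the last
--     # element, which yields a closed [lo, hi] bin and ends the binning
--     specs = []
--     i = inicio
--     while i < k:
--         lo, hi = boundary[i - 1], boundary[i]
--         if hi == last:
--             specs.append((lo, hi, True))
--             break
--         specs.append((lo, hi, False))
--         i += 1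
--     buckets = [[] for _ in specs]
--     for x in dados:
--         for b, (lo, hi, closed) in zip(buckets, specs):
--             if lo <= x and (x < hi or (closed and x == hi)):
--                 b.append(x)
--     return buckets
-- ===== Notes on version B (the rewrite author's own statement) =====
-- stated objective: alternative
-- what changed: Replaces A's recursion that runs a separate filter pass over the whole data list for every bin by precomputing the bin interval specs once and then distributing the elements into all buckets in a single pass over the data.
import Mathlib
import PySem

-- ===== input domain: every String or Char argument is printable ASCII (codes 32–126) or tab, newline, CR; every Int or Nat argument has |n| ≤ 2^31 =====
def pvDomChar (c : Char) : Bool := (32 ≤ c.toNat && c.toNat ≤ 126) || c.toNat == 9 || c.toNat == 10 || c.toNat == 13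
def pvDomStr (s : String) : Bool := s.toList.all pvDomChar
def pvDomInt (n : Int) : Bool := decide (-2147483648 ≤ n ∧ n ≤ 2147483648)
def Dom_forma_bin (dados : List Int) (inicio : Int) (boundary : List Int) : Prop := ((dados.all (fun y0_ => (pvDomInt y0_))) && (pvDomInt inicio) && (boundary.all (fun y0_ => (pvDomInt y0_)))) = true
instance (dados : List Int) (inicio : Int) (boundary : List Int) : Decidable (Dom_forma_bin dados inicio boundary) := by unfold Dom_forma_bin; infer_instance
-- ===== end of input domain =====

-- B replaces A's one-filter-pass-per-bin recursion by precomputing the bin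
-- intervals once and distributing the data in a single pass over `dados`
-- (a different traversal order of the same work; objective: alternative).

-- ===== PORT A =====
-- A's recursion counts down (len(boundary) - inicio); that bound is the fuel.
def formaBinAux (dados : List Int) (boundary : List Int) : Nat → Int → List (List Int)
  | 0, _ => []
  | fuel + 1, i =>
    if i < (boundary.length : Int) then
      match PySem.List.pyGet? boundary i, PySem.List.pyGet? dados ((dados.length : Int) - 1) with
      | some bi, some dl =>
        if bi ≠ dl then
          match PySem.List.pyGet? boundary (i - 1) with
          | some lo =>
            [dados.filter (fun x => decide (lo ≤ x) && decide (x < bi))]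
              ++ formaBinAux dados boundary fuel (i + 1)
          | none => []    -- IndexError: excluded by Pre_
        else
          match PySem.List.pyGet? boundary (i - 1) with
          | some lo => [dados.filter (fun x => decide (lo ≤ x) && decide (x ≤ bi))]
          | none => []    -- IndexError: excluded by Pre_
      | _, _ => []        -- IndexError: excluded by Pre_
    else []

def forma_bin (dados : List Int) (inicio : Int) (boundary : List Int) : List (List Int) :=
  formaBinAux dados boundary ((boundary.length : Int) - inicio).toNat inicio

-- ===== PORT B =====
-- bin specs: (lo, hi, closed?) built by walking boundary from `inicio`
def pvSpecsAux (boundary : List Int) (last : Int) : Nat → Int → List (Int × Int × Bool)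
  | 0, _ => []
  | fuel + 1, i =>
    if i < (boundary.length : Int) then
      match PySem.List.pyGet? boundary (i - 1), PySem.List.pyGet? boundary i with
      | some lo, some hi =>
        if hi = last then [(lo, hi, true)]
        else (lo, hi, false) :: pvSpecsAux boundary last fuel (i + 1)
      | _, _ => []        -- IndexError: excluded by Pre_
    else []

def pvSpecs (boundary : List Int) (last : Int) (i : Int) : List (Int × Int × Bool) :=
  pvSpecsAux boundary last ((boundary.length : Int) - i).toNat i

def pvInside (s : Int × Int × Bool) (x : Int) : Bool :=
  decide (s.1 ≤ x) && (decide (x < s.2.1) || (s.2.2 && decide (x = s.2.1)))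

-- one pass over dados; each in-place bucket append becomes a functional rebuild
def pvDistribute (specs : List (Int × Int × Bool)) (dados : List Int) : List (List Int) :=
  dados.foldl
    (fun buckets x =>
      (buckets.zip specs).map (fun p => if pvInside p.2 x then p.1 ++ [x] else p.1))
    (specs.map (fun _ => []))

def forma_bin_alt (dados : List Int) (inicio : Int) (boundary : List Int) : List (List Int) :=
  if inicio ≥ (boundary.length : Int) then []
  else
    match PySem.List.pyGet? dados ((dados.length : Int) - 1) with
    | some last => pvDistribute (pvSpecs boundary last inicio) dados
    | none => []        -- IndexError: excluded by Pre_

-- ===== PRECONDITION & SPEC =====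
-- Pre_ excludes exactly the inputs where A raises IndexError: empty `dados`
-- (dados[-1]) or an out-of-range boundary index, whenever inicio < len(boundary).
def Pre_forma_bin (dados : List Int) (inicio : Int) (boundary : List Int) : Prop :=
  inicio < (boundary.length : Int) → (dados ≠ [] ∧ 1 - (boundary.length : Int) ≤ inicio)
instance (dados : List Int) (inicio : Int) (boundary : List Int) : Decidable (Pre_forma_bin dados inicio boundary) := by unfold Pre_forma_bin; infer_instance

def pvWitness_forma_bin : List Int × Int × List Int := ([1, 3, 2, 5], 1, [0, 2, 4, 5])

def Spec_forma_bin (dados : List Int) (inicio : Int) (boundary : List Int) (out : List (List Int)) : Prop := out = forma_bin_alt dados inicio boundary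
instance (dados : List Int) (inicio : Int) (boundary : List Int) (out : List (List Int)) : Decidable (Spec_forma_bin dados inicio boundary out) := by unfold Spec_forma_bin; infer_instance

-- ===== CLAIM (what is proved, stated in full; the proofs are below) =====
def Claim_equal_forma_bin : Prop := ∀ (dados : List Int) (inicio : Int) (boundary : List Int), Dom_forma_bin dados inicio boundary → Pre_forma_bin dados inicio boundary → Spec_forma_bin dados inicio boundary (forma_bin dados inicio boundary)

-- ===== LEMMAS AND PROOFS =====

theorem pyGet?_isSome_of_inRange {xs : List Int} {i : Int}
    (h1 : -(xs.length : Int) ≤ i) (h2 : i < (xs.length : Int)) :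
    ∃ v, PySem.List.pyGet? xs i = some v := by
  cases h : PySem.List.pyGet? xs i with
  | some v => exact ⟨v, rfl⟩
  | none =>
    rw [PySem.List.pyGet?_eq_none_iff] at h
    exact absurd (by constructor <;> omega : PySem.Raise.InRange xs.length i) h

theorem zip_map_self {α β : Type} (g : α → β) (l : List α) :
    (l.map g).zip l = l.map (fun s => (g s, s)) := by
  induction l with
  | nil => rfl
  | cons a t ih => simp [ih]

theorem distribute_invariant (dados : List Int) (specs : List (Int × Int × Bool))
    (g : (Int × Int × Bool) → List Int) :
    dados.foldl
      (fun buckets x =>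
        (buckets.zip specs).map (fun p => if pvInside p.2 x then p.1 ++ [x] else p.1))
      (specs.map g)
    = specs.map (fun s => g s ++ dados.filter (pvInside s)) := by
  induction dados generalizing g with
  | nil => simp
  | cons x tl ih =>
    simp only [List.foldl_cons]
    rw [zip_map_self, List.map_map]
    rw [show ((fun (p : List Int × (Int × Int × Bool)) =>
          if pvInside p.2 x then p.1 ++ [x] else p.1) ∘ (fun s => (g s, s)))
        = (fun s => if pvInside s x then g s ++ [x] else g s) from rfl]
    rw [show (specs.map (fun s => if pvInside s x then g s ++ [x] else g s))
        = specs.map (fun s => (fun t => if pvInside t x then g t ++ [x] else g t) s) from rfl]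
    rw [ih (fun t => if pvInside t x then g t ++ [x] else g t)]
    apply List.map_congr_left
    intro s _
    by_cases h : pvInside s x <;> simp [h]

theorem pvDistribute_eq_filters (specs : List (Int × Int × Bool)) (dados : List Int) :
    pvDistribute specs dados = specs.map (fun s => dados.filter (pvInside s)) := by
  unfold pvDistribute
  rw [distribute_invariant dados specs (fun _ => [])]
  simp

theorem forma_bin_aux_eq_specs (dados : List Int) (boundary : List Int) (last : Int)
    (hlast : PySem.List.pyGet? dados ((dados.length : Int) - 1) = some last) :
    ∀ (fuel : Nat) (i : Int), 1 - (boundary.length : Int) ≤ i →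
      formaBinAux dados boundary fuel i
        = (pvSpecsAux boundary last fuel i).map (fun s => dados.filter (pvInside s)) := by
  intro fuel
  induction fuel with
  | zero => intro i _; rfl
  | succ fuel ih =>
    intro i hge
    by_cases hlt : i < (boundary.length : Int)
    · obtain ⟨bi, hbi⟩ := pyGet?_isSome_of_inRange (by omega) hlt (xs := boundary) (i := i)
      obtain ⟨lo, hlo⟩ := pyGet?_isSome_of_inRange (by omega) (by omega)
        (xs := boundary) (i := i - 1)
      simp only [formaBinAux, pvSpecsAux, hlt, if_pos, hbi, hlo, hlast]
      by_cases heq : bi = last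
      · subst heq
        rw [if_neg (fun h => h rfl), if_pos rfl]
        simp only [List.map_cons, List.map_nil]
        congr 1
        apply List.filter_congr
        intro x _
        simp only [pvInside, Bool.true_and]
        rw [Bool.eq_iff_iff]
        simp only [Bool.and_eq_true, Bool.or_eq_true, decide_eq_true_eq]
        omega
      · rw [if_pos heq, if_neg heq, List.map_cons, List.singleton_append]
        congr 1
        · apply List.filter_congr
          intro x _
          simp [pvInside]
        · exact ih (i + 1) (by omega)
    · simp [formaBinAux, pvSpecsAux, hlt]

-- ===== VERDICT (by name: the statement is the Claim_ definition above) =====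
theorem forma_bin_spec : Claim_equal_forma_bin := by
  intro dados inicio boundary _ hpre
  unfold Spec_forma_bin forma_bin_alt forma_bin pvSpecs
  by_cases hlt : inicio < (boundary.length : Int)
  · obtain ⟨hne, hge⟩ := hpre hlt
    have hlen : 0 < dados.length := List.length_pos_iff.mpr hne
    obtain ⟨last, hlast⟩ := pyGet?_isSome_of_inRange (xs := dados)
      (i := (dados.length : Int) - 1) (by omega) (by omega)
    rw [if_neg (by omega), hlast,
      forma_bin_aux_eq_specs dados boundary last hlast _ inicio hge]
    exact (pvDistribute_eq_filters _ _).symm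
  · rw [if_pos (by omega)]
    have : ((boundary.length : Int) - inicio).toNat = 0 := by omega
    rw [this]
    rfl
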